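-- pv_equiv track=rewrite | github.com/tsani/coding-cat-public | first-a-then-b/mutation_5.py | first_a_then_b
-- ===== SOURCE A (Python) =====
-- def first_a_then_b(list_ab: list) -> list:
--     '''
--     Returning a list of [A + B] rather than A + B
--     '''
--     A = []
--     B = []
--     for char in range(len(list_ab)):
--         if list_ab[char] == "a":
--             A.append(list_ab[char])
--         elif list_ab[char] == "b":
--             B.append(list_ab[char])
--     return [A + B]
-- ===== SOURCE B (Python) =====
-- def first_a_then_b(list_ab: list) -> list:
--     na = list_ab.count("a")
--     nb = list_ab.count("b")
--     return [["a"] * na + ["b"] * nb]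
-- ===== Notes on version B (the rewrite author's own statement) =====
-- stated objective: simpler
-- what changed: Replaces the index loop with per-branch appends by two count() scans and reconstructs the result by string repetition.
import Mathlib
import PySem

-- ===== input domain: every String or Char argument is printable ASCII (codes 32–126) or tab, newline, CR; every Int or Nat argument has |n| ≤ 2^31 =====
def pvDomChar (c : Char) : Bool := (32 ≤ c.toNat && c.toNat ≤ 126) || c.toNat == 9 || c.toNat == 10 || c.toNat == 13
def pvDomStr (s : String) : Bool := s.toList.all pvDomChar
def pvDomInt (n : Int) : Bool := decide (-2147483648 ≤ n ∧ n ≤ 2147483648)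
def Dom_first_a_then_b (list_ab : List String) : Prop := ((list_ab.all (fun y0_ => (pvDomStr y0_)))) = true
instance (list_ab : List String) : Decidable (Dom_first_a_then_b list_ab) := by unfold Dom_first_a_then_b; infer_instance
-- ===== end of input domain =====

-- B replaces A's index loop (appending each matched element to A/B) by two count() scans
-- and reconstruction via repetition; objective: simpler.

-- ===== PORT A =====
-- loop "for char in range(len(list_ab))" with in-range indexing; getD default is never used
def first_a_then_b (list_ab : List String) : List (List String) :=
  let st :=
    (List.range list_ab.length).foldl
      (fun (st : List String × List String) char =>
        let x := list_ab.getD char ""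
        if x = "a" then (st.1 ++ [x], st.2)
        else if x = "b" then (st.1, st.2 ++ [x])
        else st)
      ([], [])
  [st.1 ++ st.2]

-- ===== PORT B =====
def first_a_then_b_alt (list_ab : List String) : List (List String) :=
  let na := PySem.List.count list_ab "a"
  let nb := PySem.List.count list_ab "b"
  [List.replicate na "a" ++ List.replicate nb "b"]

-- ===== PRECONDITION & SPEC =====
def Spec_first_a_then_b (list_ab : List String) (out : List (List String)) : Prop := out = first_a_then_b_alt list_ab
instance (list_ab : List String) (out : List (List String)) : Decidable (Spec_first_a_then_b list_ab out) := by unfold Spec_first_a_then_b; infer_instance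

-- ===== CLAIM (what is proved, stated in full; the proofs are below) =====
def Claim_equal_first_a_then_b : Prop := ∀ (list_ab : List String), Dom_first_a_then_b list_ab → Spec_first_a_then_b list_ab (first_a_then_b list_ab)

-- ===== LEMMAS AND PROOFS =====

-- folding over the index range equals folding over the elements
theorem pv_foldl_idx {σ : Type} (xs : List String) (f : σ → String → σ) (s : σ) :
    (List.range xs.length).foldl (fun st i => f st (xs.getD i "")) s = xs.foldl f s := by
  induction xs generalizing s with
  | nil => simp
  | cons x xs ih =>
    rw [List.length_cons, List.range_succ_eq_map]
    simp only [List.foldl_cons, List.foldl_map, List.getD_cons_zero, List.getD_cons_succ]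
    exact ih (f s x)

theorem pv_loop_inv (xs : List String) (A B : List String) :
    xs.foldl
      (fun (st : List String × List String) x =>
        if x = "a" then (st.1 ++ [x], st.2)
        else if x = "b" then (st.1, st.2 ++ [x])
        else st)
      (A, B)
    = (A ++ xs.filter (· == "a"), B ++ xs.filter (· == "b")) := by
  induction xs generalizing A B with
  | nil => simp
  | cons x xs ih =>
    by_cases ha : x = "a"
    · subst ha; simp [ih]
    · by_cases hb : x = "b"
      · subst hb; simp [ha, ih]
      · simp [ha, hb, ih]

theorem pv_filter_rep (xs : List String) (a : String) :
    xs.filter (· == a) = List.replicate (PySem.List.count xs a) a := by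
  induction xs with
  | nil => simp [PySem.List.count]
  | cons x xs ih =>
    by_cases h : x = a
    · subst h
      simp [PySem.List.count, List.replicate_succ] at ih ⊢
      exact ih
    · simp [PySem.List.count, h] at ih ⊢
      exact ih

-- ===== VERDICT (by name: the statement is the Claim_ definition above) =====
theorem first_a_then_b_spec : Claim_equal_first_a_then_b := by
  intro xs _
  show _ = _
  unfold first_a_then_b first_a_then_b_alt
  rw [pv_foldl_idx xs
      (fun (st : List String × List String) x =>
        if x = "a" then (st.1 ++ [x], st.2)
        else if x = "b" then (st.1, st.2 ++ [x])
        else st) ([], [])]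
  rw [pv_loop_inv, pv_filter_rep, pv_filter_rep]
  simp
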